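-- pv_equiv track=rewrite | github.com/pypi-data/pypi-mirror-374 | packages/pykeedy/pykeedy-0.1.1-py3-none-any.whl/pykeedy/slots.py | count_generateable_words
-- ===== SOURCE A (Python) =====
-- def count_generateable_words(
--     words: list[str], slots: list[list[str]], unique_only: bool = True
-- ) -> float:
--     matches = 0
--     if unique_only:
--         words = list(set(words))
--     for word in words:
--         if can_generate_word(word, slots):
--             matches += 1
--     return matches
--
-- def can_generate_word(word: str, slot_list: list[list[str]]) -> bool:
--     memo = {}
--
--     def dp(word_index: int, slot_index: int) -> bool:
--         if (word_index, slot_index) in memo: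
--             return memo[(word_index, slot_index)]
--
--         # Base cases
--         if word_index == len(word):
--             # Success if we've consumed all the word (regardless of remaining slots)
--             result = True
--         elif slot_index >= len(slot_list):
--             # Failed if we have remaining word but no more slots
--             result = False
--         else:
--             result = False
--
--             # Option 1: Skip this slot (use 0 elements)
--             if dp(word_index, slot_index + 1):
--                 result = True
--             else:
--                 # Option 2: Try each element in current slot (use 1 element)
--                 for option in slot_list[slot_index]:
--                     if word[word_index:].startswith(option):
--                         if dp(word_index + len(option), slot_index + 1):
--                             result = True
--                             break
--
--         memo[(word_index, slot_index)] = result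
--         return result
--
--     return dp(0, 0)
-- ===== SOURCE B (Python) =====
-- def count_generateable_words(
--     words: list[str], slots: list[list[str]], unique_only: bool = True
-- ) -> float:
--     pool = set(words) if unique_only else words
--     return sum(1 for w in pool if _can_build(w, slots))
--
--
-- def _can_build(word: str, slots: list[list[str]]) -> bool:
--     # forward DP: set of word positions reachable after consuming a prefix of slots
--     n = len(word)
--     reachable = {0}
--     for slot in slots:
--         if n in reachable:
--             return True  # success is monotone: a reached end position survives skipping
--         new = set(reachable)  # skipping the slot is always allowed
--         for pos in reachable:
--             for opt in slot:
--                 if word.startswith(opt, pos):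
--                     new.add(pos + len(opt))
--         reachable = new
--     return n in reachable
-- ===== Notes on version B (the rewrite author's own statement) =====
-- stated objective: alternative
-- what changed: can_generate_word's top-down memoized recursion over (word_index, slot_index) is replaced by a forward set-based DP that propagates the set of reachable word positions slot by slot, early-exits once the end position is reached, and checks len(word) membership at the end; the counting wrapper becomes a sum over a filtered pool.
import Mathlib
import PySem

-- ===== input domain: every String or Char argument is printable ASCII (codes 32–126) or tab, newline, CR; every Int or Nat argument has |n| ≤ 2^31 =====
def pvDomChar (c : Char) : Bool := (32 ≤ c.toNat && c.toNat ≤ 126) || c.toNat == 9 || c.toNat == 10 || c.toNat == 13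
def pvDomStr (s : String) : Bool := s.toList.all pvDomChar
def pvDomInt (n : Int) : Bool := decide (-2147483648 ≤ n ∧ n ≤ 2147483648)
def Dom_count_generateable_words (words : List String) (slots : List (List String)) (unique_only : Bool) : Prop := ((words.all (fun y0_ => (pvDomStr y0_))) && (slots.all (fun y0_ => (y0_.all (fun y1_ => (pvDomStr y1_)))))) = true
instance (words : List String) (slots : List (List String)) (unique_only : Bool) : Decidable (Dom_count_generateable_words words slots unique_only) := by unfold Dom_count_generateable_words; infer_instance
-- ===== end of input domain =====

-- B replaces the top-down memoized recursion with a forward reachable-position set DP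
-- (alternative decomposition, same asymptotic cost); return values proved equal everywhere.

-- ===== PORT A =====
-- dp(word_index, slot_index) of A, recursion on the slot-list suffix (slot_index strictly
-- increases in every recursive call; the memo table is a pure cache and does not change values).
def pvDpA (w : List Char) (slots : List (List String)) (i : Nat) : Bool :=
  if i = w.length then true
  else
    match slots with
    | [] => false
    | s :: rest =>
      pvDpA w rest i ||
        s.any (fun opt =>
          PySem.Chars.startswith (w.drop i) opt.toList && pvDpA w rest (i + opt.toList.length))

def pvCanGenerateWord (word : String) (slot_list : List (List String)) : Bool :=
  pvDpA word.toList slot_list 0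

def count_generateable_words (words : List String) (slots : List (List String)) (unique_only : Bool) : Int :=
  let words' := if unique_only then PySem.Set.ofList words else words
  words'.foldl (fun acc word => if pvCanGenerateWord word slots then acc + 1 else acc) 0

-- ===== PORT B =====
-- one slot of the forward DP: new = copy of reachable, plus pos+len(opt) for every match
def pvStepB (w : List Char) (reachable : PySem.Set Nat) (slot : List String) : PySem.Set Nat :=
  reachable.foldl
    (fun acc pos =>
      slot.foldl
        (fun acc2 opt =>
          if PySem.Chars.startswith (w.drop pos) opt.toList then
            PySem.Set.add acc2 (pos + opt.toList.length)
          else acc2)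
        acc)
    reachable

-- the slot loop of B, with its early exit once the end position has been reached
def pvReachB (w : List Char) (slots : List (List String)) (r : PySem.Set Nat) : Bool :=
  match slots with
  | [] => r.contains w.length
  | s :: rest => if r.contains w.length then true else pvReachB w rest (pvStepB w r s)

def pvCanBuildB (word : String) (slots : List (List String)) : Bool :=
  let w := word.toList
  pvReachB w slots (PySem.Set.ofList [0])

def count_generateable_words_alt (words : List String) (slots : List (List String)) (unique_only : Bool) : Int :=
  let pool := if unique_only then PySem.Set.ofList words else words
  ((pool.filter (fun w => pvCanBuildB w slots)).length : Int)

-- ===== PRECONDITION & SPEC =====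
def Spec_count_generateable_words (words : List String) (slots : List (List String)) (unique_only : Bool) (out : Int) : Prop := out = count_generateable_words_alt words slots unique_only
instance (words : List String) (slots : List (List String)) (unique_only : Bool) (out : Int) : Decidable (Spec_count_generateable_words words slots unique_only out) := by unfold Spec_count_generateable_words; infer_instance

-- ===== CLAIM (what is proved, stated in full; the proofs are below) =====
def Claim_equal_count_generateable_words : Prop := ∀ (words : List String) (slots : List (List String)) (unique_only : Bool), Dom_count_generateable_words words slots unique_only → Spec_count_generateable_words words slots unique_only (count_generateable_words words slots unique_only)

-- ===== LEMMAS AND PROOFS =====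

theorem pvDpA_len (w : List Char) (slots : List (List String)) :
    pvDpA w slots w.length = true := by
  unfold pvDpA; simp

theorem pvDpA_nil (w : List Char) (i : Nat) :
    pvDpA w [] i = decide (i = w.length) := by
  unfold pvDpA; split <;> simp_all

theorem pvDpA_cons (w : List Char) (s : List String) (rest : List (List String)) (i : Nat) :
    pvDpA w (s :: rest) i =
      (decide (i = w.length) || pvDpA w rest i ||
        s.any (fun opt =>
          PySem.Chars.startswith (w.drop i) opt.toList && pvDpA w rest (i + opt.toList.length))) := by
  rw [pvDpA]; split <;> simp_all [pvDpA_len]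

-- membership after the inner fold over one slot's options
theorem mem_inner_fold (w : List Char) (pos : Nat) (slot : List String)
    (acc : PySem.Set Nat) (j : Nat) :
    (j ∈ slot.foldl
        (fun acc2 opt =>
          if PySem.Chars.startswith (w.drop pos) opt.toList then
            PySem.Set.add acc2 (pos + opt.toList.length)
          else acc2)
        acc) ↔
      j ∈ acc ∨ ∃ opt ∈ slot,
        PySem.Chars.startswith (w.drop pos) opt.toList = true ∧ j = pos + opt.toList.length := by
  induction slot generalizing acc with
  | nil => simp
  | cons o os ih =>
    simp only [List.foldl_cons]
    rw [ih]
    by_cases h : PySem.Chars.startswith (w.drop pos) o.toList = true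
    · simp only [h, if_true, PySem.Set.mem_add]
      constructor
      · rintro ((h1 | h1) | ⟨opt, hm, hs, hj⟩)
        · exact Or.inl h1
        · exact Or.inr ⟨o, List.mem_cons_self, h, h1⟩
        · exact Or.inr ⟨opt, List.mem_cons_of_mem _ hm, hs, hj⟩
      · rintro (h1 | ⟨opt, hm, hs, hj⟩)
        · exact Or.inl (Or.inl h1)
        · rcases List.mem_cons.mp hm with he | hm2
          · subst he; exact Or.inl (Or.inr hj)
          · exact Or.inr ⟨opt, hm2, hs, hj⟩
    · rw [if_neg h]
      constructor
      · rintro (h1 | ⟨opt, hm, hs, hj⟩)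
        · exact Or.inl h1
        · exact Or.inr ⟨opt, List.mem_cons_of_mem _ hm, hs, hj⟩
      · rintro (h1 | ⟨opt, hm, hs, hj⟩)
        · exact Or.inl h1
        · rcases List.mem_cons.mp hm with he | hm2
          · subst he; exact absurd hs h
          · exact Or.inr ⟨opt, hm2, hs, hj⟩

-- membership after folding all positions of r (with arbitrary accumulator)
theorem mem_outer_fold (w : List Char) (slot : List String)
    (r : List Nat) (init : PySem.Set Nat) (j : Nat) :
    (j ∈ r.foldl
        (fun acc pos =>
          slot.foldl
            (fun acc2 opt =>
              if PySem.Chars.startswith (w.drop pos) opt.toList then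
                PySem.Set.add acc2 (pos + opt.toList.length)
              else acc2)
            acc)
        init) ↔
      j ∈ init ∨ ∃ pos ∈ r, ∃ opt ∈ slot,
        PySem.Chars.startswith (w.drop pos) opt.toList = true ∧ j = pos + opt.toList.length := by
  induction r generalizing init with
  | nil => simp
  | cons p ps ih =>
    simp only [List.foldl_cons]
    rw [ih, mem_inner_fold]
    constructor
    · rintro ((h | h) | ⟨pos, hp, rest⟩)
      · tauto
      · exact Or.inr ⟨p, List.mem_cons_self, h⟩
      · exact Or.inr ⟨pos, List.mem_cons_of_mem _ hp, rest⟩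
    · rintro (h | ⟨pos, hp, rest⟩)
      · tauto
      · rcases List.mem_cons.mp hp with h1 | h1
        · subst h1; exact Or.inl (Or.inr rest)
        · exact Or.inr ⟨pos, h1, rest⟩

theorem mem_stepB (w : List Char) (r : PySem.Set Nat) (slot : List String) (j : Nat) :
    j ∈ pvStepB w r slot ↔
      j ∈ r ∨ ∃ pos ∈ r, ∃ opt ∈ slot,
        PySem.Chars.startswith (w.drop pos) opt.toList = true ∧ j = pos + opt.toList.length := by
  unfold pvStepB; exact mem_outer_fold w slot r r j

-- the forward DP reaches w.length iff A's dp succeeds from some position of r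
theorem fold_reaches_iff (w : List Char) (slots : List (List String)) (r : PySem.Set Nat) :
    pvReachB w slots r = true ↔ ∃ i ∈ r, pvDpA w slots i = true := by
  induction slots generalizing r with
  | nil =>
    simp only [pvReachB]
    constructor
    · intro h; exact ⟨w.length, by simpa using h, pvDpA_len w []⟩
    · rintro ⟨i, hi, hd⟩
      rw [pvDpA_nil] at hd
      simpa [decide_eq_true_iff.mp hd] using hi
  | cons s rest ih =>
    by_cases hc : w.length ∈ r
    · have ht : pvReachB w (s :: rest) r = true := by
        simp [pvReachB, hc]
      rw [ht]
      exact iff_of_true rfl ⟨w.length, hc, pvDpA_len w (s :: rest)⟩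
    · have hstep : pvReachB w (s :: rest) r = pvReachB w rest (pvStepB w r s) := by
        simp [pvReachB, hc]
      rw [hstep, ih]
      constructor
      · rintro ⟨j, hj, hd⟩
        rcases (mem_stepB w r s j).mp hj with hj | ⟨pos, hp, opt, ho, hs, hjeq⟩
        · exact ⟨j, hj, by rw [pvDpA_cons]; simp [hd]⟩
        · refine ⟨pos, hp, ?_⟩
          rw [pvDpA_cons]
          subst hjeq
          simp only [Bool.or_eq_true, List.any_eq_true]
          exact Or.inr ⟨opt, ho, by
            simp only [Bool.and_eq_true]
            exact ⟨hs, by simpa using hd⟩⟩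
      · rintro ⟨i, hi, hd⟩
        rw [pvDpA_cons] at hd
        simp only [Bool.or_eq_true, List.any_eq_true, Bool.and_eq_true, decide_eq_true_iff] at hd
        rcases hd with (hlen | hskip) | ⟨opt, ho, hs, hd⟩
        · refine ⟨i, (mem_stepB w r s i).mpr (Or.inl hi), ?_⟩
          subst hlen; exact pvDpA_len w rest
        · exact ⟨i, (mem_stepB w r s i).mpr (Or.inl hi), hskip⟩
        · exact ⟨i + opt.toList.length,
            (mem_stepB w r s _).mpr (Or.inr ⟨i, hi, opt, ho, hs, rfl⟩), hd⟩

theorem canBuild_eq (word : String) (slots : List (List String)) :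
    pvCanBuildB word slots = pvCanGenerateWord word slots := by
  unfold pvCanBuildB pvCanGenerateWord
  have h := fold_reaches_iff word.toList slots (PySem.Set.ofList [0])
  rcases hb : pvDpA word.toList slots 0 with _ | _
  · simp only [Bool.eq_false_iff]
    intro hc
    rcases h.mp hc with ⟨i, hi, hd⟩
    simp [PySem.Set.mem_ofList] at hi
    subst hi
    rw [hb] at hd; exact Bool.false_ne_true hd
  · exact h.mpr ⟨0, by simp [PySem.Set.mem_ofList], hb⟩

theorem count_fold_eq_filter (slots : List (List String)) (l : List String) (m : Int) :
    l.foldl (fun acc word => if pvCanGenerateWord word slots then acc + 1 else acc) m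
      = m + ((l.filter (fun w => pvCanBuildB w slots)).length : Int) := by
  induction l generalizing m with
  | nil => simp
  | cons x xs ih =>
    have hf : (fun w => pvCanBuildB w slots) = (fun w => pvCanGenerateWord w slots) := by
      funext w; exact canBuild_eq w slots
    simp only [List.foldl_cons, List.filter_cons, canBuild_eq]
    by_cases h : pvCanGenerateWord x slots = true
    · simp only [h, if_true, ih, hf, List.length_cons]
      push_cast; ring
    · simp [h, ih, hf]

-- ===== VERDICT (by name: the statement is the Claim_ definition above) =====
theorem count_generateable_words_spec : Claim_equal_count_generateable_words := by
  intro words slots unique_only _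
  unfold Spec_count_generateable_words count_generateable_words count_generateable_words_alt
  simp only []
  rw [count_fold_eq_filter]
  simp
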